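-- pv_equiv track=rewrite | github.com/gepd/Deviot | libs/I18n.py | loadTransDict
-- ===== SOURCE A (Python) =====
-- def loadTransDict(text):
--     trans_dict = {}
--     lines = text.split('\n')
--     lines = [line.strip() for line in lines if lines if line.strip() and
--              not line.strip().startswith('#')]
--     blocks = splitLines(lines)
--     for block in blocks:
--         key, value = loadTransPair(block)
--         trans_dict[key] = value
--     return trans_dict
--
-- def splitLines(lines):
--     block, blocks = [], []
--     for line in lines:
--         if line.startswith('msgid'):
--             blocks.append(block)
--             block = []
--         block.append(line)
--     blocks.append(block)
--     blocks.pop(0)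
--     return blocks
--
-- def loadTransPair(block):
--     is_key, key, value = True, '', ''
--     for line in block:
--         index = line.index('"')
--         cur_str = line[index + 1: -1]
--         if line.startswith('msgstr'):
--             is_key = False
--         if is_key:
--             key += cur_str
--         else:
--             value += cur_str
--     return (key, value)
-- ===== SOURCE B (Python) =====
-- def loadTransDict(text):
--     trans_dict = {}
--     key, value = '', ''
--     is_key = True
--     has_entry = False
--     for raw in text.split('\n'):
--         line = raw.strip()
--         if not line or line.startswith('#'):
--             continue
--         if line.startswith('msgid'):
--             if has_entry:
--                 trans_dict[key] = value
--             key, value, is_key = '', '', True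
--             has_entry = True
--         if not has_entry:
--             continue
--         if line.startswith('msgstr'):
--             is_key = False
--         index = line.index('"')
--         cur = line[index + 1: -1]
--         if is_key:
--             key += cur
--         else:
--             value += cur
--     if has_entry:
--         trans_dict[key] = value
--     return trans_dict
-- ===== Notes on version B (the rewrite author's own statement) =====
-- stated objective: simpler
-- what changed: Replaces A's three-stage pipeline (filter lines, split into msgid-delimited blocks via splitLines, fold each block into a pair via loadTransPair) with one single-pass state machine over the lines that keeps (key, value, is_key, has_entry) and flushes into the dict at each msgid and at the end.
-- outside the precondition, e.g. on loadTransDict('msgid "a"\nnoquote'): A raises ValueError, B raises ValueError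
import Mathlib
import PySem

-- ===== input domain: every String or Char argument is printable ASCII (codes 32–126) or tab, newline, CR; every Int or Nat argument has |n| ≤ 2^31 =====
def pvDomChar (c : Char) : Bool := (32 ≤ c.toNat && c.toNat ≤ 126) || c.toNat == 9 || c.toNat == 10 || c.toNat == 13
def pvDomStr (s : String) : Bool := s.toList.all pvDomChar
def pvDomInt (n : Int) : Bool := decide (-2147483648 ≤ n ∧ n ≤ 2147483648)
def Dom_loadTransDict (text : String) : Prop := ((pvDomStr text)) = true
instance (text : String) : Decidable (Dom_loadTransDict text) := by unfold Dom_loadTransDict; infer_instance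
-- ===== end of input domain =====

-- B replaces A's three-stage pipeline (filter, split into msgid blocks, fold each block into a
-- pair) by a single-pass state machine over the lines; objective: simpler. Same return value;
-- neither mutates its argument.

-- ===== PORT A =====
-- lines = [line.strip() for line in text.split('\n') if line.strip() and not line.strip().startswith('#')]
-- (the comprehension's 'if lines' guard is always true: split('\n') is never empty)
def pvLinesA (text : String) : List (List Char) :=
  ((PySem.Chars.splitOn text.toList ['\n']).filter
    (fun l => !(PySem.Chars.strip l).isEmpty &&
              !PySem.Chars.startswith (PySem.Chars.strip l) ['#'])).map PySem.Chars.strip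

-- splitLines: fold state = (block, blocks); afterwards blocks.append(block); blocks.pop(0)
-- (blocks is non-empty after the final append, so pop(0) never raises; it is List.drop 1)
def pvSplitLinesA (lines : List (List Char)) : List (List (List Char)) :=
  let s := lines.foldl
    (fun (s : List (List Char) × List (List (List Char))) line =>
      if PySem.Chars.startswith line ['m','s','g','i','d'] then ([line], s.2 ++ [s.1])
      else (s.1 ++ [line], s.2)) ([], [])
  (s.2 ++ [s.1]).drop 1

-- loadTransPair; 'none' = the ValueError of line.index('"') (excluded by Pre_); state (is_key, key, value)
def pvPairStepA (st : Option (Bool × List Char × List Char)) (line : List Char) :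
    Option (Bool × List Char × List Char) :=
  match st with
  | none => none
  | some (isKey, key, value) =>
    let index := PySem.Chars.find line ['"']
    if index = -1 then none
    else
      let cur := PySem.Chars.slice line (some (index + 1)) (some (-1))
      let isKey' := if PySem.Chars.startswith line ['m','s','g','s','t','r'] then false else isKey
      if isKey' then some (isKey', key ++ cur, value) else some (isKey', key, value ++ cur)

def pvPairA (block : List (List Char)) : Option (Bool × List Char × List Char) :=
  block.foldl pvPairStepA (some (true, [], []))

-- for block in blocks: trans_dict[key] = value  ('none' propagates the ValueError)
def pvDictA (blocks : List (List (List Char)))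
    (d : Option (PySem.Dict (List Char) (List Char))) : Option (PySem.Dict (List Char) (List Char)) :=
  blocks.foldl
    (fun d? block =>
      match d?, pvPairA block with
      | some d, some (_, k, v) => some (d.insert k v)
      | _, _ => none) d

def loadTransDict (text : String) : List (String × String) :=
  match pvDictA (pvSplitLinesA (pvLinesA text)) (some PySem.Dict.empty) with
  | some d => d.items.map (fun p => (String.ofList p.1, String.ofList p.2))
  | none => []   -- unreachable under Pre_ (Python raises ValueError there)

-- ===== PORT B =====
-- single-pass state (dict, key, value, is_key, has_entry); 'none' = the ValueError of line.index('"')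
def pvStepB (st : Option (PySem.Dict (List Char) (List Char) × List Char × List Char × Bool × Bool))
    (raw : List Char) :
    Option (PySem.Dict (List Char) (List Char) × List Char × List Char × Bool × Bool) :=
  match st with
  | none => none
  | some (d, key, value, isKey, hasEntry) =>
    let line := PySem.Chars.strip raw
    if line.isEmpty || PySem.Chars.startswith line ['#'] then st
    else
      let (d, key, value, isKey, hasEntry) :=
        if PySem.Chars.startswith line ['m','s','g','i','d'] then
          ((if hasEntry then d.insert key value else d), ([] : List Char), ([] : List Char), true, true)
        else (d, key, value, isKey, hasEntry)
      if !hasEntry then some (d, key, value, isKey, hasEntry)   -- before the first msgid: skip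
      else
        let isKey := if PySem.Chars.startswith line ['m','s','g','s','t','r'] then false else isKey
        let index := PySem.Chars.find line ['"']
        if index = -1 then none
        else
          let cur := PySem.Chars.slice line (some (index + 1)) (some (-1))
          if isKey then some (d, key ++ cur, value, isKey, hasEntry)
          else some (d, key, value ++ cur, isKey, hasEntry)

def loadTransDict_alt (text : String) : List (String × String) :=
  match (PySem.Chars.splitOn text.toList ['\n']).foldl pvStepB
      (some (PySem.Dict.empty, [], [], true, false)) with
  | some (d, key, value, _, hasEntry) =>
      ((if hasEntry then d.insert key value else d).items).map
        (fun p => (String.ofList p.1, String.ofList p.2))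
  | none => []

-- ===== PRECONDITION & SPEC =====
-- Pre_ excludes exactly the inputs on which the Python A raises ValueError: a stripped,
-- non-comment, non-empty line at or after the first 'msgid' line that contains no '"'.
def Pre_loadTransDict (text : String) : Prop :=
  (((((PySem.Chars.splitOn text.toList ['\n']).filter
      (fun l => !(PySem.Chars.strip l).isEmpty &&
                !PySem.Chars.startswith (PySem.Chars.strip l) ['#'])).map PySem.Chars.strip).dropWhile
      (fun l => !PySem.Chars.startswith l ['m','s','g','i','d'])).all
      (fun l => PySem.Chars.isIn ['"'] l)) = true
instance (text : String) : Decidable (Pre_loadTransDict text) := by unfold Pre_loadTransDict; infer_instance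

def pvWitness_loadTransDict : String := "# c\nmsgid \"a\"\n\"b\"\nmsgstr \"x\"\nmsgid \"a\"\nmsgstr \"\""

def Spec_loadTransDict (text : String) (out : List (String × String)) : Prop := out = loadTransDict_alt text
instance (text : String) (out : List (String × String)) : Decidable (Spec_loadTransDict text out) := by unfold Spec_loadTransDict; infer_instance

-- ===== CLAIM (what is proved, stated in full; the proofs are below) =====
def Claim_equal_loadTransDict : Prop := ∀ (text : String), Dom_loadTransDict text → Pre_loadTransDict text → Spec_loadTransDict text (loadTransDict text)


-- ===== LEMMAS AND PROOFS =====

def pvKeep (raw : List Char) : Bool :=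
  !(PySem.Chars.strip raw).isEmpty && !PySem.Chars.startswith (PySem.Chars.strip raw) ['#']

-- the body of pvStepB once the line is known to be kept (and already stripped)
def pvCore (st : Option (PySem.Dict (List Char) (List Char) × List Char × List Char × Bool × Bool))
    (line : List Char) :
    Option (PySem.Dict (List Char) (List Char) × List Char × List Char × Bool × Bool) :=
  match st with
  | none => none
  | some (d, key, value, isKey, hasEntry) =>
    let (d, key, value, isKey, hasEntry) :=
      if PySem.Chars.startswith line ['m','s','g','i','d'] then
        ((if hasEntry then d.insert key value else d), ([] : List Char), ([] : List Char), true, true)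
      else (d, key, value, isKey, hasEntry)
    if !hasEntry then some (d, key, value, isKey, hasEntry)
    else
      let isKey := if PySem.Chars.startswith line ['m','s','g','s','t','r'] then false else isKey
      let index := PySem.Chars.find line ['"']
      if index = -1 then none
      else
        let cur := PySem.Chars.slice line (some (index + 1)) (some (-1))
        if isKey then some (d, key ++ cur, value, isKey, hasEntry)
        else some (d, key, value ++ cur, isKey, hasEntry)

def pvFinish (st : Option (PySem.Dict (List Char) (List Char) × List Char × List Char × Bool × Bool)) :
    Option (PySem.Dict (List Char) (List Char)) :=
  match st with
  | none => none
  | some (d, key, value, _, hasEntry) => some (if hasEntry then d.insert key value else d)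

def pvBlocksFrom (cur : List (List Char)) : List (List Char) → List (List (List Char))
  | [] => [cur]
  | l :: t =>
    if PySem.Chars.startswith l ['m','s','g','i','d'] then cur :: pvBlocksFrom [l] t
    else pvBlocksFrom (cur ++ [l]) t

theorem pvStepB_eq (st : Option (PySem.Dict (List Char) (List Char) × List Char × List Char × Bool × Bool))
    (raw : List Char) :
    pvStepB st raw = if pvKeep raw then pvCore st (PySem.Chars.strip raw) else st := by
  cases st with
  | none => simp [pvStepB, pvCore]
  | some s =>
    obtain ⟨d, k, v, ik, he⟩ := s
    simp only [pvStepB, pvCore, pvKeep]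
    by_cases h1 : (PySem.Chars.strip raw).isEmpty
    · simp [h1]
    · by_cases h2 : PySem.Chars.startswith (PySem.Chars.strip raw) ['#'] = true
      · simp [h1, h2]
      · simp [h1, h2]

theorem pvFoldB_eq (raws : List (List Char))
    (st : Option (PySem.Dict (List Char) (List Char) × List Char × List Char × Bool × Bool)) :
    raws.foldl pvStepB st = ((raws.filter pvKeep).map PySem.Chars.strip).foldl pvCore st :=
  calc raws.foldl pvStepB st
      = raws.foldl (fun st raw => if pvKeep raw then pvCore st (PySem.Chars.strip raw) else st) st :=
        PySem.List.foldl_congr_mem raws pvStepB _ st (fun acc x _ => pvStepB_eq acc x)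
    _ = (raws.filter pvKeep).foldl (fun st raw => pvCore st (PySem.Chars.strip raw)) st :=
        PySem.List.foldl_if_eq_foldl_filter pvKeep _ raws st
    _ = ((raws.filter pvKeep).map PySem.Chars.strip).foldl pvCore st := List.foldl_map.symm

theorem pvNotMsgstr (l : List Char)
    (h : PySem.Chars.startswith l ['m','s','g','i','d'] = true) :
    PySem.Chars.startswith l ['m','s','g','s','t','r'] = false := by
  rw [PySem.Chars.startswith_iff] at h
  by_contra hc
  rw [Bool.not_eq_false, PySem.Chars.startswith_iff] at hc
  obtain ⟨r, hr⟩ := h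
  obtain ⟨r', hr'⟩ := hc
  rw [← hr] at hr'
  simp at hr'

theorem pvFindQuote (l : List Char) (h : PySem.Chars.isIn ['"'] l = true) :
    ¬ PySem.Chars.find l ['"'] = -1 := by
  rw [PySem.Chars.find_eq_neg_one_iff]
  rw [PySem.Chars.isIn_iff_infix] at h
  exact fun hn => hn h

theorem pvSplitA_general (ls : List (List Char)) :
    ∀ (cur : List (List Char)) (bs : List (List (List Char))),
    (let s := ls.foldl
        (fun (s : List (List Char) × List (List (List Char))) line =>
          if PySem.Chars.startswith line ['m','s','g','i','d'] then ([line], s.2 ++ [s.1])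
          else (s.1 ++ [line], s.2)) (cur, bs)
     s.2 ++ [s.1]) = bs ++ pvBlocksFrom cur ls := by
  induction ls with
  | nil => intro cur bs; simp [pvBlocksFrom]
  | cons l t ih =>
    intro cur bs
    by_cases h : PySem.Chars.startswith l ['m','s','g','i','d'] = true
    · simp only [List.foldl_cons, h, if_true, pvBlocksFrom]
      rw [ih [l] (bs ++ [cur])]
      simp
    · have h' : PySem.Chars.startswith l ['m','s','g','i','d'] = false := by simpa using h
      simp only [List.foldl_cons, h', Bool.false_eq_true, if_false, pvBlocksFrom]
      rw [ih (cur ++ [l]) bs]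

theorem pvSplitLinesA_eq (ls : List (List Char)) :
    pvSplitLinesA ls = (pvBlocksFrom [] ls).drop 1 := by
  simp only [pvSplitLinesA]
  rw [pvSplitA_general ls [] []]
  simp

theorem pvBlocksFrom_drop1 (ls : List (List Char)) :
    ∀ (cur cur' : List (List Char)),
    (pvBlocksFrom cur ls).drop 1 = (pvBlocksFrom cur' ls).drop 1 := by
  induction ls with
  | nil => intro cur cur'; simp [pvBlocksFrom]
  | cons l t ih =>
    intro cur cur'
    by_cases h : PySem.Chars.startswith l ['m','s','g','i','d'] = true
    · simp [pvBlocksFrom, h]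
    · simp only [pvBlocksFrom, h]
      exact ih _ _

-- main invariant: once past the first msgid line, B's single pass tracks A's pending block:
-- pvPairA of the open block equals B's (is_key, key, value) state
theorem pvMain (t : List (List Char)) :
    ∀ (d : PySem.Dict (List Char) (List Char)) (cur : List (List Char))
      (ik : Bool) (k v : List Char),
    pvPairA cur = some (ik, k, v) →
    (∀ l ∈ t, PySem.Chars.isIn ['"'] l = true) →
    pvDictA (pvBlocksFrom cur t) (some d) = pvFinish (t.foldl pvCore (some (d, k, v, ik, true))) := by
  induction t with
  | nil =>
    intro d cur ik k v hcur hq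
    simp [pvBlocksFrom, pvDictA, pvFinish, hcur]
  | cons l t ih =>
    intro d cur ik k v hcur hq
    have hql : PySem.Chars.isIn ['"'] l = true := hq l (by simp)
    have hfind := pvFindQuote l hql
    have hqt : ∀ x ∈ t, PySem.Chars.isIn ['"'] x = true := fun x hx => hq x (by simp [hx])
    by_cases h : PySem.Chars.startswith l ['m','s','g','i','d'] = true
    · -- a new msgid block starts: A closes cur, B flushes (k, v)
      have hns := pvNotMsgstr l h
      have hpl : pvPairA [l] =
          some (true, PySem.Chars.slice l (some (PySem.Chars.find l ['"'] + 1)) (some (-1)), []) := by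
        simp [pvPairA, pvPairStepA, hfind, hns]
      have hstep : pvCore (some (d, k, v, ik, true)) l =
          some (d.insert k v, PySem.Chars.slice l (some (PySem.Chars.find l ['"'] + 1)) (some (-1)),
                [], true, true) := by
        simp [pvCore, h, hns, hfind]
      have hblk : pvBlocksFrom cur (l :: t) = cur :: pvBlocksFrom [l] t := by
        simp [pvBlocksFrom, h]
      have hA : pvDictA (cur :: pvBlocksFrom [l] t) (some d)
          = pvDictA (pvBlocksFrom [l] t) (some (d.insert k v)) := by
        simp [pvDictA, hcur]
      rw [hblk, hA, List.foldl_cons, hstep]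
      exact ih (d.insert k v) [l] true _ [] hpl hqt
    · -- continuation line: both sides extend the pending pair identically
      have hblk : pvBlocksFrom cur (l :: t) = pvBlocksFrom (cur ++ [l]) t := by
        simp [pvBlocksFrom, h]
      rw [hblk, List.foldl_cons]
      by_cases hs : PySem.Chars.startswith l ['m','s','g','s','t','r'] = true
      · have hpl : pvPairA (cur ++ [l]) =
            some (false, k, v ++ PySem.Chars.slice l (some (PySem.Chars.find l ['"'] + 1)) (some (-1))) := by
          rw [pvPairA, List.foldl_append,
              show (cur.foldl pvPairStepA (some (true, [], []))) = pvPairA cur from rfl, hcur]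
          simp [pvPairStepA, hfind, hs]
        have hstep : pvCore (some (d, k, v, ik, true)) l =
            some (d, k, v ++ PySem.Chars.slice l (some (PySem.Chars.find l ['"'] + 1)) (some (-1)),
                  false, true) := by
          simp [pvCore, h, hs, hfind]
        rw [hstep]
        exact ih d (cur ++ [l]) false k _ hpl hqt
      · have hs' : PySem.Chars.startswith l ['m','s','g','s','t','r'] = false := by
          simpa using hs
        cases ik with
        | true =>
          have hpl : pvPairA (cur ++ [l]) =
              some (true, k ++ PySem.Chars.slice l (some (PySem.Chars.find l ['"'] + 1)) (some (-1)), v) := by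
            rw [pvPairA, List.foldl_append,
                show (cur.foldl pvPairStepA (some (true, [], []))) = pvPairA cur from rfl, hcur]
            simp [pvPairStepA, hfind, hs']
          have hstep : pvCore (some (d, k, v, true, true)) l =
              some (d, k ++ PySem.Chars.slice l (some (PySem.Chars.find l ['"'] + 1)) (some (-1)),
                    v, true, true) := by
            simp [pvCore, h, hs', hfind]
          rw [hstep]
          exact ih d (cur ++ [l]) true _ v hpl hqt
        | false =>
          have hpl : pvPairA (cur ++ [l]) =
              some (false, k, v ++ PySem.Chars.slice l (some (PySem.Chars.find l ['"'] + 1)) (some (-1))) := by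
            rw [pvPairA, List.foldl_append,
                show (cur.foldl pvPairStepA (some (true, [], []))) = pvPairA cur from rfl, hcur]
            simp [pvPairStepA, hfind, hs']
          have hstep : pvCore (some (d, k, v, false, true)) l =
              some (d, k, v ++ PySem.Chars.slice l (some (PySem.Chars.find l ['"'] + 1)) (some (-1)),
                    false, true) := by
            simp [pvCore, h, hs', hfind]
          rw [hstep]
          exact ih d (cur ++ [l]) false k _ hpl hqt

-- phase 1: lines before the first msgid are skipped by B and discarded by A's pop(0)
theorem pvPhase1 (ls : List (List Char)) :
    ∀ (d : PySem.Dict (List Char) (List Char)),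
    ((ls.dropWhile (fun l => !PySem.Chars.startswith l ['m','s','g','i','d'])).all
      (fun l => PySem.Chars.isIn ['"'] l)) = true →
    pvDictA ((pvBlocksFrom [] ls).drop 1) (some d)
      = pvFinish (ls.foldl pvCore (some (d, [], [], true, false))) := by
  induction ls with
  | nil => intro d _; simp [pvBlocksFrom, pvDictA, pvFinish]
  | cons l t ih =>
    intro d hpre
    by_cases h : PySem.Chars.startswith l ['m','s','g','i','d'] = true
    · rw [List.dropWhile_cons_of_neg (by simp [h])] at hpre
      simp only [List.all_cons, Bool.and_eq_true, List.all_eq_true] at hpre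
      have hfind := pvFindQuote l hpre.1
      have hns := pvNotMsgstr l h
      have hblk : (pvBlocksFrom [] (l :: t)).drop 1 = pvBlocksFrom [l] t := by
        simp [pvBlocksFrom, h]
      have hstep : pvCore (some (d, [], [], true, false)) l =
          some (d, PySem.Chars.slice l (some (PySem.Chars.find l ['"'] + 1)) (some (-1)),
                [], true, true) := by
        simp [pvCore, h, hns, hfind]
      have hpl : pvPairA [l] =
          some (true, PySem.Chars.slice l (some (PySem.Chars.find l ['"'] + 1)) (some (-1)), []) := by
        simp [pvPairA, pvPairStepA, hfind, hns]
      rw [hblk, List.foldl_cons, hstep]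
      exact pvMain t d [l] true _ [] hpl hpre.2
    · rw [List.dropWhile_cons_of_pos (by simp [h])] at hpre
      have hstep : pvCore (some (d, [], [], true, false)) l = some (d, [], [], true, false) := by
        simp [pvCore, h]
      have hblk : (pvBlocksFrom [] (l :: t)).drop 1 = (pvBlocksFrom [] t).drop 1 := by
        simp only [pvBlocksFrom, h]
        exact pvBlocksFrom_drop1 t _ _
      rw [hblk, List.foldl_cons, hstep]
      exact ih d hpre

-- ===== VERDICT (by name: the statement is the Claim_ definition above) =====
theorem loadTransDict_spec : Claim_equal_loadTransDict := by
  intro text _ hpre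
  unfold Spec_loadTransDict loadTransDict loadTransDict_alt
  rw [pvFoldB_eq]
  have hls : ((PySem.Chars.splitOn text.toList ['\n']).filter pvKeep).map PySem.Chars.strip
      = pvLinesA text := rfl
  rw [hls, pvSplitLinesA_eq]
  have hpre' : (((pvLinesA text).dropWhile
      (fun l => !PySem.Chars.startswith l ['m','s','g','i','d'])).all
      (fun l => PySem.Chars.isIn ['"'] l)) = true := hpre
  have hE := pvPhase1 (pvLinesA text) PySem.Dict.empty hpre'
  cases hst : (pvLinesA text).foldl pvCore (some (PySem.Dict.empty, [], [], true, false)) with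
  | none =>
    rw [hst] at hE
    simp only [pvFinish] at hE
    rw [hE]
  | some s =>
    obtain ⟨d, k, v, ik, he⟩ := s
    rw [hst] at hE
    simp only [pvFinish] at hE
    rw [hE]
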